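-- pv_equiv track=rewrite | github.com/mutabay/Intelligent-DB-Optimizer | tests/performance_tests/test_performance_benchmarks.py | _generate_complex_query
-- ===== SOURCE A (Python) =====
-- def _generate_complex_query(complexity: int) -> str:
--     """Generate SQL query with specified complexity level."""
--     base_query = "SELECT c.name"
--     tables = ["customers c"]
--     joins = []
--     where_conditions = []
--
--     # Add complexity through joins and conditions
--     if complexity >= 2:
--         base_query += ", o.order_date"
--         tables.append("orders o")
--         joins.append("c.customer_key = o.customer_key")
--
--     if complexity >= 3:
--         base_query += ", l.quantity"
--         tables.append("lineitem l")
--         joins.append("o.order_key = l.order_key")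
--
--     # Add WHERE conditions based on complexity
--     for i in range(min(complexity, 3)):
--         if i == 0:
--             where_conditions.append("c.nation_key IN (1, 2, 3)")
--         elif i == 1:
--             where_conditions.append("o.order_date > '1995-01-01'")
--         elif i == 2:
--             where_conditions.append("l.quantity > 10")
--
--     # Construct final query
--     query = f"{base_query} FROM {', '.join(tables)}"
--
--     if joins:
--         for i, join in enumerate(joins):
--             if i == 0:
--                 query += f" WHERE {join}"
--             else:
--                 query += f" AND {join}"
--
--     if where_conditions:
--         if not joins:
--             query += " WHERE "
--         else:
--             query += " AND "
--         query += " AND ".join(where_conditions)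
--
--     if complexity >= 4:
--         query += " GROUP BY c.customer_key, c.name"
--         if complexity >= 5:
--             query += " HAVING COUNT(o.order_key) > 1"
--
--     query += " LIMIT 100"
--
--     return query
-- ===== SOURCE B (Python) =====
-- # The query depends on complexity only through its clamp to [0, 5], so the six
-- # possible queries are precomputed once and returned by table lookup.
-- _QUERIES = (
--     "SELECT c.name FROM customers c LIMIT 100",
--     "SELECT c.name FROM customers c WHERE c.nation_key IN (1, 2, 3) LIMIT 100",
--     "SELECT c.name, o.order_date FROM customers c, orders o"
--     " WHERE c.customer_key = o.customer_key"
--     " AND c.nation_key IN (1, 2, 3) AND o.order_date > '1995-01-01' LIMIT 100",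
--     "SELECT c.name, o.order_date, l.quantity FROM customers c, orders o, lineitem l"
--     " WHERE c.customer_key = o.customer_key AND o.order_key = l.order_key"
--     " AND c.nation_key IN (1, 2, 3) AND o.order_date > '1995-01-01' AND l.quantity > 10"
--     " LIMIT 100",
--     "SELECT c.name, o.order_date, l.quantity FROM customers c, orders o, lineitem l"
--     " WHERE c.customer_key = o.customer_key AND o.order_key = l.order_key"
--     " AND c.nation_key IN (1, 2, 3) AND o.order_date > '1995-01-01' AND l.quantity > 10"
--     " GROUP BY c.customer_key, c.name LIMIT 100",
--     "SELECT c.name, o.order_date, l.quantity FROM customers c, orders o, lineitem l"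
--     " WHERE c.customer_key = o.customer_key AND o.order_key = l.order_key"
--     " AND c.nation_key IN (1, 2, 3) AND o.order_date > '1995-01-01' AND l.quantity > 10"
--     " GROUP BY c.customer_key, c.name HAVING COUNT(o.order_key) > 1 LIMIT 100",
-- )
--
-- def _generate_complex_query(complexity: int) -> str:
--     return _QUERIES[max(0, min(complexity, 5))]
-- ===== Notes on version B (the rewrite author's own statement) =====
-- stated objective: simpler
-- what changed: B replaces A's conditional string assembly entirely: since the output depends on complexity only through its clamp to 0..5, the six possible queries are precomputed literals and B is a single table lookup on max(0, min(complexity, 5)).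
import Mathlib
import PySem

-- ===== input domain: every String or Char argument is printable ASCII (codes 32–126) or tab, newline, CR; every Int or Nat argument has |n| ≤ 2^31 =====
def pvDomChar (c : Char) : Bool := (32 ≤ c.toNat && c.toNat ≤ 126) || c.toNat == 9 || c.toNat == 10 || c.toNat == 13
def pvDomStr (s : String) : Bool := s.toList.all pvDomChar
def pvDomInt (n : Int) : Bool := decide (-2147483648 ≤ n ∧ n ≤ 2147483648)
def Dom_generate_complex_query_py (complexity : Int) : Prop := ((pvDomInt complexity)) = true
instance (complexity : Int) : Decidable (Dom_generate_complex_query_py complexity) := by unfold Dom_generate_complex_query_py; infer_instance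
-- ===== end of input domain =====

-- B: the output depends on complexity only through its clamp to 0..5, so B is a
-- lookup of six precomputed query literals instead of A's conditional assembly.

-- ===== PORT A =====
def generate_complex_query_py (complexity : Int) : String :=
  let base_query := "SELECT c.name"
  let tables : List String := ["customers c"]
  let joins : List String := []
  let where_conditions : List String := []
  let s1 := if complexity ≥ 2 then
      (base_query ++ ", o.order_date", tables ++ ["orders o"], joins ++ ["c.customer_key = o.customer_key"])
    else (base_query, tables, joins)
  let base_query := s1.1
  let tables := s1.2.1
  let joins := s1.2.2
  let s2 := if complexity ≥ 3 then
      (base_query ++ ", l.quantity", tables ++ ["lineitem l"], joins ++ ["o.order_key = l.order_key"])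
    else (base_query, tables, joins)
  let base_query := s2.1
  let tables := s2.2.1
  let joins := s2.2.2
  let where_conditions := (PySem.List.pyRange 0 (min complexity 3) 1).foldl
    (fun acc i =>
      if i = 0 then acc ++ ["c.nation_key IN (1, 2, 3)"]
      else if i = 1 then acc ++ ["o.order_date > '1995-01-01'"]
      else if i = 2 then acc ++ ["l.quantity > 10"]
      else acc) where_conditions
  let query := base_query ++ " FROM " ++ PySem.Str.join ", " tables
  let query := if joins ≠ [] then
      (PySem.List.enumerate joins 0).foldl
        (fun q p => if p.1 = 0 then q ++ " WHERE " ++ p.2 else q ++ " AND " ++ p.2) query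
    else query
  let query := if where_conditions ≠ [] then
      (if joins = [] then query ++ " WHERE " else query ++ " AND ")
        ++ PySem.Str.join " AND " where_conditions
    else query
  let query := if complexity ≥ 4 then
      (let q := query ++ " GROUP BY c.customer_key, c.name"
       if complexity ≥ 5 then q ++ " HAVING COUNT(o.order_key) > 1" else q)
    else query
  query ++ " LIMIT 100"

-- ===== PORT B =====
-- The module-level table of the six possible queries (Source B's _QUERIES).
def pvQueries : List String :=
  [ "SELECT c.name FROM customers c LIMIT 100"
  , "SELECT c.name FROM customers c WHERE c.nation_key IN (1, 2, 3) LIMIT 100"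
  , "SELECT c.name, o.order_date FROM customers c, orders o WHERE c.customer_key = o.customer_key AND c.nation_key IN (1, 2, 3) AND o.order_date > '1995-01-01' LIMIT 100"
  , "SELECT c.name, o.order_date, l.quantity FROM customers c, orders o, lineitem l WHERE c.customer_key = o.customer_key AND o.order_key = l.order_key AND c.nation_key IN (1, 2, 3) AND o.order_date > '1995-01-01' AND l.quantity > 10 LIMIT 100"
  , "SELECT c.name, o.order_date, l.quantity FROM customers c, orders o, lineitem l WHERE c.customer_key = o.customer_key AND o.order_key = l.order_key AND c.nation_key IN (1, 2, 3) AND o.order_date > '1995-01-01' AND l.quantity > 10 GROUP BY c.customer_key, c.name LIMIT 100"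
  , "SELECT c.name, o.order_date, l.quantity FROM customers c, orders o, lineitem l WHERE c.customer_key = o.customer_key AND o.order_key = l.order_key AND c.nation_key IN (1, 2, 3) AND o.order_date > '1995-01-01' AND l.quantity > 10 GROUP BY c.customer_key, c.name HAVING COUNT(o.order_key) > 1 LIMIT 100" ]

def generate_complex_query_py_alt (complexity : Int) : String :=
  -- _QUERIES[max(0, min(complexity, 5))]; the index is in range, so getD's default is unreachable
  (PySem.List.pyGet? pvQueries (max 0 (min complexity 5))).getD ""

-- ===== PRECONDITION & SPEC =====
def Spec_generate_complex_query_py (complexity : Int) (out : String) : Prop := out = generate_complex_query_py_alt complexity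
instance (complexity : Int) (out : String) : Decidable (Spec_generate_complex_query_py complexity out) := by unfold Spec_generate_complex_query_py; infer_instance

-- ===== CLAIM (what is proved, stated in full; the proofs are below) =====
def Claim_equal_generate_complex_query_py : Prop := ∀ (complexity : Int), Dom_generate_complex_query_py complexity → Spec_generate_complex_query_py complexity (generate_complex_query_py complexity)

-- ===== LEMMAS AND PROOFS =====

-- ===== VERDICT (by name: the statement is the Claim_ definition above) =====
set_option maxRecDepth 8192 in
theorem generate_complex_query_py_spec : Claim_equal_generate_complex_query_py := by
  intro c _
  unfold Spec_generate_complex_query_py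
  by_cases h5 : (5:Int) ≤ c
  · simp [generate_complex_query_py, generate_complex_query_py_alt,
      show (2:Int) ≤ c by omega, show (3:Int) ≤ c by omega, show (4:Int) ≤ c by omega, h5]
    decide
  · by_cases h0 : c ≤ 0
    · simp [generate_complex_query_py, generate_complex_query_py_alt,
        show ¬ (2:Int) ≤ c by omega, show ¬ (3:Int) ≤ c by omega,
        show ¬ (4:Int) ≤ c by omega, show min c 3 = c by omega, show min c 5 = c by omega, show max 0 c = 0 by omega,
        PySem.List.pyRange_one_eq_nil h0]
      decide
    · have h : c = 1 ∨ c = 2 ∨ c = 3 ∨ c = 4 := by omega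
      rcases h with h | h | h | h <;> subst h <;> decide
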